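-- pv_equiv track=rewrite | github.com/balqui/troppap | src_data/Boros_et_al.py | computeH
-- ===== SOURCE A (Python) =====
-- def computeH(a,l):
--     result=[]
--     for j in range(len(a)):
--         output=True
--         for i in l:
--             if a[j][i]==0:
--                 output=False
--         if output:
--             result.append(j)
--     return result
-- ===== SOURCE B (Python) =====
-- def computeH(a, l):
--     # Column-major: intersect per-column sets of rows that are nonzero there.
--     rows = set(range(len(a)))
--     for i in l:
--         rows &= {j for j in range(len(a)) if a[j][i] != 0}
--     return sorted(rows)
-- ===== Notes on version B (the rewrite author's own statement) =====
-- stated objective: alternative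
-- what changed: Inverts the loop order: instead of a per-row boolean flag over an inner scan of l, B builds for each column index the set of rows nonzero there, intersects these sets seeded with all row indices, and returns the sorted intersection.
import Mathlib
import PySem

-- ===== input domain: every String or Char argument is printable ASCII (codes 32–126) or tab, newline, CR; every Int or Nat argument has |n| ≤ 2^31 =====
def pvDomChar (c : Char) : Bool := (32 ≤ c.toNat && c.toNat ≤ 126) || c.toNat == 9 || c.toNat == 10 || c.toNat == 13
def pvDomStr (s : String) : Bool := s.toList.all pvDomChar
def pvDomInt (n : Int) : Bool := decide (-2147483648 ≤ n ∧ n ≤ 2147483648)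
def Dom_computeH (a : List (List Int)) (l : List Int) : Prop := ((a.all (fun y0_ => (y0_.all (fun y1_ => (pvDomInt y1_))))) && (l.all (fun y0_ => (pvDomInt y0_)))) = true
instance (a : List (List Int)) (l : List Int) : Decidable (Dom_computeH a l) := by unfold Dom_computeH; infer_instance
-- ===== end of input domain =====

-- ===== PORT A =====
-- A: row-major scan with a per-row boolean flag; B: column-major set intersection, sorted at
-- the end. Proved equal; Pre_ excludes the inputs where Python raises IndexError.
def computeH (a : List (List Int)) (l : List Int) : List Int :=
  (List.range a.length).foldl (fun (result : List Int) (j : Nat) =>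
    let output := l.foldl (fun output i =>
      if ((PySem.List.pyGet? ((PySem.List.pyGet? a (j : Int)).getD []) i).getD 0) == 0 then
        false
      else output) true
    if output then result ++ [(j : Int)] else result) []

-- ===== PORT B =====
def computeH_alt (a : List (List Int)) (l : List Int) : List Int :=
  let rows : PySem.Set Int :=
    l.foldl (fun rows i =>
      PySem.Set.inter rows (PySem.Set.ofList
        (((List.range a.length).filter (fun (j : Nat) =>
            ((PySem.List.pyGet? ((PySem.List.pyGet? a (j : Int)).getD []) i).getD 0) != 0)).map
          (fun (j : Nat) => (j : Int)))))
      (PySem.Set.ofList ((List.range a.length).map (fun (j : Nat) => (j : Int))))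
  PySem.List.sorted rows (fun x => x) false

-- ===== PRECONDITION & SPEC =====
-- Pre_: every column index in l is a valid Python index into every row; outside this both
-- Pythons raise IndexError.
def Pre_computeH (a : List (List Int)) (l : List Int) : Prop :=
  ∀ row ∈ a, ∀ i ∈ l, PySem.Raise.InRange row.length i
instance (a : List (List Int)) (l : List Int) : Decidable (Pre_computeH a l) := by
  unfold Pre_computeH; infer_instance
def pvWitness_computeH : List (List Int) × List Int := ([[1, 0], [2, 3]], [0, 1])
def Spec_computeH (a : List (List Int)) (l : List Int) (out : List Int) : Prop := out = computeH_alt a l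
instance (a : List (List Int)) (l : List Int) (out : List Int) : Decidable (Spec_computeH a l out) := by unfold Spec_computeH; infer_instance

-- ===== CLAIM (what is proved, stated in full; the proofs are below) =====
def Claim_equal_computeH : Prop := ∀ (a : List (List Int)) (l : List Int), Dom_computeH a l → Pre_computeH a l → Spec_computeH a l (computeH a l)

-- ===== LEMMAS AND PROOFS =====

-- Proof-side names for the terms both ports build.
def pvVal (a : List (List Int)) (j : Nat) (i : Int) : Int :=
  (PySem.List.pyGet? ((PySem.List.pyGet? a (j : Int)).getD []) i).getD 0

def pvIdx (n : Nat) : List Int := (List.range n).map (fun (j : Nat) => (j : Int))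

def pvCol (a : List (List Int)) (i : Int) : List Int :=
  ((List.range a.length).filter (fun (j : Nat) => pvVal a j i != 0)).map (fun (j : Nat) => (j : Int))

def pvKeep (a : List (List Int)) (l : List Int) : List Int :=
  ((List.range a.length).filter (fun (j : Nat) => l.all (fun i => pvVal a j i != 0))).map
    (fun (j : Nat) => (j : Int))

-- Set.ofList of a duplicate-free list is the list itself.
theorem pv_foldl_add_of_nodup {s : List Int} {xs : List Int} (hx : xs.Nodup)
    (hd : ∀ x ∈ xs, ¬ s.contains x) : xs.foldl PySem.Set.add s = s ++ xs := by
  induction xs generalizing s with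
  | nil => simp
  | cons x t ih =>
    have hns : ¬ s.contains x := hd x (by simp)
    have hxs : x ∉ s := by simpa using hns
    have hadd : PySem.Set.add s x = s ++ [x] := by
      simp [PySem.Set.add, PySem.Set.contains, hxs]
    simp only [List.foldl_cons, hadd]
    rw [ih hx.of_cons]
    · simp
    · intro y hy h
      have hmem : y ∈ s ++ [x] := by simpa [List.contains_iff_mem] using h
      rcases List.mem_append.mp hmem with h1 | h2
      · exact hd y (List.mem_cons_of_mem _ hy) (by simpa [List.contains_iff_mem])
      · have hyx : y = x := by simpa using h2
        exact (List.nodup_cons.mp hx).1 (hyx ▸ hy)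

theorem pv_ofList_of_nodup {xs : List Int} (hx : xs.Nodup) : PySem.Set.ofList xs = xs := by
  simpa [PySem.Set.ofList, PySem.Set.empty] using pv_foldl_add_of_nodup hx (by simp)

theorem pv_nodup_coe_range (n : Nat) : ((List.range n).map (fun j : Nat => (j : Int))).Nodup :=
  (List.nodup_range (n := n)).map (fun _ _ h => by exact_mod_cast h)

theorem pv_contains_ofList (xs : List Int) (x : Int) :
    (PySem.Set.ofList xs).contains x = xs.contains x := by
  simp only [PySem.Set.contains]
  rw [Bool.eq_iff_iff]
  simp [PySem.Set.mem_ofList]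

-- Repeated intersection (= filtering) is one filter by the conjunction.
theorem pv_foldl_filter (c : Int → Int → Bool) (l : List Int) :
    ∀ rows : List Int,
      l.foldl (fun r i => r.filter (c i)) rows = rows.filter (fun x => l.all (fun i => c i x)) := by
  induction l with
  | nil => intro rows; simp
  | cons i t ih =>
    intro rows
    simp only [List.foldl_cons, ih, List.filter_filter]
    apply List.filter_congr
    intro x _
    simp [Bool.and_comm]

theorem pv_filter_coe_range (p : Int → Bool) (n : Nat) :
    ((List.range n).map (fun j : Nat => (j : Int))).filter p =
      ((List.range n).filter (fun (j : Nat) => p (j : Int))).map (fun (j : Nat) => (j : Int)) := by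
  rw [List.filter_map]; rfl

theorem pv_contains_pvCol (a : List (List Int)) (i : Int) (j : Nat)
    (hj : j ∈ List.range a.length) : (pvCol a i).contains (j : Int) = (pvVal a j i != 0) := by
  rw [Bool.eq_iff_iff]
  unfold pvCol
  simp only [List.contains_iff_mem, List.mem_map, List.mem_filter]
  constructor
  · rintro ⟨k, ⟨_, hk⟩, hkj⟩
    have hk' : k = j := by exact_mod_cast hkj
    subst hk'
    simpa using hk
  · intro h
    exact ⟨j, ⟨hj, by simpa using h⟩, rfl⟩

theorem computeH_eq (a : List (List Int)) (l : List Int) : computeH a l = pvKeep a l := by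
  show (List.range a.length).foldl (fun (result : List Int) (j : Nat) =>
      let output := l.foldl (fun output i => if pvVal a j i == 0 then false else output) true
      if output then result ++ [(j : Int)] else result) [] = pvKeep a l
  simp only [PySem.List.foldl_if_false_eq, Bool.true_and]
  rw [PySem.List.foldl_append_if
    (p := fun j : Nat => !l.any (fun i => pvVal a j i == 0))
    (f := fun j : Nat => (j : Int))]
  rw [List.nil_append]
  unfold pvKeep
  apply congrArg
  apply List.filter_congr
  intro j _
  rw [Bool.eq_iff_iff]
  simp [bne]

theorem computeH_alt_eq (a : List (List Int)) (l : List Int) : computeH_alt a l = pvKeep a l := by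
  show PySem.List.sorted
      (l.foldl (fun rows i => PySem.Set.inter rows (PySem.Set.ofList (pvCol a i)))
        (PySem.Set.ofList (pvIdx a.length))) (fun x => x) false = pvKeep a l
  have hstep : (fun (rows : List Int) (i : Int) =>
      PySem.Set.inter rows (PySem.Set.ofList (pvCol a i))) =
      fun rows i => rows.filter (fun x => (pvCol a i).contains x) := by
    funext rows i
    unfold PySem.Set.inter
    apply List.filter_congr
    intro x _
    exact pv_contains_ofList _ _
  rw [hstep,
      pv_ofList_of_nodup (xs := pvIdx a.length)
        (by unfold pvIdx; exact pv_nodup_coe_range a.length),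
      pv_foldl_filter (fun i x => (pvCol a i).contains x) l]
  unfold pvIdx
  rw [pv_filter_coe_range]
  have hpt : ∀ j ∈ List.range a.length,
      (l.all (fun i => (pvCol a i).contains (j : Int))) =
        (l.all (fun i => pvVal a j i != 0)) := by
    intro j hj
    exact List.all_congr rfl (fun i => pv_contains_pvCol a i j hj)
  rw [List.filter_congr hpt]
  -- sorted of the already strictly increasing list is itself
  apply PySem.List.sorted_eq_of_perm_of_pairwise_lt _ _ _ (List.Perm.refl _)
  have hpw : ((List.range a.length).filter
      (fun j => l.all (fun i => pvVal a j i != 0))).Pairwise (· < ·) :=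
    (List.pairwise_lt_range (n := a.length)).sublist List.filter_sublist
  exact List.pairwise_map.mpr (hpw.imp (fun h => by exact_mod_cast h))

-- ===== VERDICT (by name: the statement is the Claim_ definition above) =====
theorem computeH_spec : Claim_equal_computeH := by
  intro a l _ _
  unfold Spec_computeH
  rw [computeH_eq, computeH_alt_eq]
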